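-- pv_equiv track=rewrite | github.com/teymurrzayev/python-naa | lesson-3/task1.py | flatten_arr
-- ===== SOURCE A (Python) =====
-- def flatten_arr(arr):
--     flattened_arr=[]
--     for arr1 in arr:
--         if isinstance(arr1,list):
--             flattened_arr.append(arr1)
--             for arr2 in arr:
--                 if isinstance(arr2,list):
--                     flattened_arr.append(arr2)
--                     for arr3 in arr:
--                         if isinstance(arr3,list):
--                             flattened_arr.append(arr3)
--                         else:
--                             arr3=list(arr3)
--                             flattened_arr.append(arr3)
--                 else:
--                     arr2=list(arr2)
--                     flattened_arr.append(arr2)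
--         else:
--             arr1=list(arr1)
--             flattened_arr.append(arr1)
--     return flattened_arr
-- ===== SOURCE B (Python) =====
-- def flatten_arr(arr):
--     # Precompute tables once instead of re-scanning arr in nested loops.
--     lists = [e if isinstance(e, list) else list(e) for e in arr]
--     inner = []
--     for a2 in lists:
--         inner.append(a2)
--         inner.extend(lists)
--     out = []
--     for a1 in lists:
--         out.append(a1)
--         out.extend(inner)
--     return out
-- ===== Notes on version B (the rewrite author's own statement) =====
-- stated objective: simpler
-- what changed: B precomputes the inner [a2]+arr table once and reuses it in a single outer loop, replacing A's triple-nested re-scanning of arr.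
import Mathlib
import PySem

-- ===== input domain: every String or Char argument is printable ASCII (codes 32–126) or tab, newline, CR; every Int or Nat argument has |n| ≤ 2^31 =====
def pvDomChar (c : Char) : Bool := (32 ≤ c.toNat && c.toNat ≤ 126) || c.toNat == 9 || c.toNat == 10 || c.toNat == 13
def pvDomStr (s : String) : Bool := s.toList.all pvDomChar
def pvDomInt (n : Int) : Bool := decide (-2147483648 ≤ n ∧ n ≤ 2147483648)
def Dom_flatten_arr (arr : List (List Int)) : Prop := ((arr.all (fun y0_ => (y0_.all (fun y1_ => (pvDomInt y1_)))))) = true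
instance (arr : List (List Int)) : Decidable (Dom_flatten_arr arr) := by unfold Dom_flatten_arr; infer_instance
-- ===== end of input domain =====

-- ===== PORT A =====
-- B precomputes the inner table once instead of re-scanning arr inside nested loops (objective: simpler).
-- A: triple-nested loop; on List (List Int) every element is a list, so isinstance branches always take the list arm.
def flatten_arr (arr : List (List Int)) : List (List Int) :=
  arr.foldl (fun acc1 arr1 =>
    arr.foldl (fun acc2 arr2 =>
      arr.foldl (fun acc3 arr3 => acc3 ++ [arr3]) (acc2 ++ [arr2])
    ) (acc1 ++ [arr1])) []

-- ===== PORT B =====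
def flatten_arr_alt (arr : List (List Int)) : List (List Int) :=
  let inner := arr.foldl (fun acc a2 => (acc ++ [a2]) ++ arr) []
  arr.foldl (fun acc a1 => (acc ++ [a1]) ++ inner) []

-- ===== PRECONDITION & SPEC =====
def Spec_flatten_arr (arr : List (List Int)) (out : List (List Int)) : Prop := out = flatten_arr_alt arr
instance (arr : List (List Int)) (out : List (List Int)) : Decidable (Spec_flatten_arr arr out) := by unfold Spec_flatten_arr; infer_instance

-- ===== CLAIM (what is proved, stated in full; the proofs are below) =====
def Claim_equal_flatten_arr : Prop := ∀ (arr : List (List Int)), Dom_flatten_arr arr → Spec_flatten_arr arr (flatten_arr arr)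

-- ===== LEMMAS AND PROOFS =====
theorem flatten_map_singleton (l : List (List Int)) :
    (List.map (fun x : List Int => [x]) l).flatten = l := by
  induction l with
  | nil => rfl
  | cons a t ih => simpa using ih

-- ===== VERDICT =====
theorem flatten_arr_spec : Claim_equal_flatten_arr := by
  intro arr _
  unfold Spec_flatten_arr flatten_arr flatten_arr_alt
  simp [List.append_assoc, flatten_map_singleton]
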